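/-
  CARRY LEMMAS: small general lemmas over the vocabulary of Gif/Spec/Common.lean, CommonMore.lean, ForestCarry.lean and Reader.lean
  that many segment proofs need. Every lemma is proved ONCE here; a segment proof applies it and does not re-derive it.
  (`hcur` is always `0x700000 ≤ R.cur ∧ R.cur + 16 ≤ 0x800000`, from `Ctx.cursor_range`; `hp : Placed H F.owned` is
  `h.owns.placed hok` for `h : GifOK H F R mem`; `hok : HeapOK H mem` is `hinv.heap` for `hinv : HeapInv H … mem`.)

  §1  THE MEASURES AND `LZOK` THROUGH A FRAME
      mu_frame                   `mu R mem' pv = mu R mem pv` from `EqOn` on the cursor, on `Buf[0]` (`pv + 88`), on `CrntShiftState`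
      mu_sameExcept              the same from a footprint whose windows miss these three
      LZOK.sameExcept            `LZOK` through a footprint whose windows miss `[pv + 8, pv + 48)`
  §2  FOOTPRINTS
      Mem.SameExcept.drop_eqOn   drop the FIRST window of a footprint when the memories agree on it
      Mem.SameExcept.drop_empty  drop the FIRST window when it is empty (`w.hi ≤ w.lo`)
      Mem.SameExcept.shrink_eqOn the general form: every window is in the new footprint, or the memories agree on it
  §3  LOOSE WINDOWS AND HEAP WINDOWS
      Loose.sub, HeapWin.sub     a window inside a loose window / a heap window is one
      Loose.gifScalar            a window inside `[gif, gif + 24)`, `[gif + 40, gif + 64)` or `[gif + 96, gif + 104)`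
      Loose.pvBody               a window inside `[pv + 4, pv + 64)` or `[pv + 80, pv + 24936)`
      Loose.tail                 behind the structural prefix of a structural object, inside the object's size
      Loose.savedTail, Loose.pendTail
                                 the uncounted slots of the SavedImages array / of the pending extension list
      HeapWin.owned, HeapWin.gif, HeapWin.pv
                                 a window inside an owned object (inside gif, inside pv) is a heap window
      Forest.mem_owned_scm / _icm / _saved / _pend
                                 an object of a component is an object of the forest
      Loose.gap_or_inObj         a loose window is a gap or lies inside the capacity of ONE object of the heap
      Loose.off_cursor           a loose window misses the cursor `[R.cur, R.cur + 16)`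
      Loose.off_consts           a loose window misses the constants `[141300H, 14139AH)`
      rem_loose, CursorOK.loose, Consts.loose
                                 `rem`, `CursorOK`, `Consts` through a footprint of loose windows
      Loose.free                 the three windows of the footprint of `free.spec` (stack below the cursor, the header's state word,
                                 the object's shadow) are loose for EVERY forest: the window list is the one `u_same` delivers
      Loose.freeMap              the five windows of the footprint of `GifFreeMapObject.spec` (stack, two state words, two shadows)
  §4  BUFFERS AND OUT-POINTERS (`BufOK`, `OutPtr`, `LiveIn`)
      BufOK.above, OutPtr.above  the buffer lies above the return-address slot of the function entered with it
      LiveIn.push_frame          a live range under one more active frame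
      BufOK.push, OutPtr.push    a caller's buffer / out-pointer under one more active frame (only `live` changes)
      BufOK.sub, OutPtr.sub      the sub-window `[b + i, b + i + k)`, `i + k ≤ n`, of a buffer is a buffer
      OutPtr.frameObj            an object of the function's OWN protected frame is an out-pointer for its callees (geometric form:
                                 the frame ends at or below the cursor)
      OutPtr.own, BufOK.own      the same from what a segment has at hand: `HeapPre` and `Ctx` at the entry, `HeapInv` of the body
      LiveIn.of_rest             a range inside an object of `rest` (`LiveIn rest [] a n`: the input, the output of the driver's pre)
                                 is live under EVERY heap and EVERY list of frames (a callee's destination / source clause)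
      LiveIn.rest_offStack       … and does not meet the stack region: `a + n ≤ 700000H ∨ 800000H ≤ a` (the no-overlap clause of
                                 `memcpy` against a local; a DISJUNCTION: `u_omega` / `u_same` / `u_frame` split it by themselves)
  §5  THE ERROR OUT-POINTER (`ErrPtr`)
      ErrPtr.liveIn              `*Error` is live under EVERY heap and with one more frame pushed
      ErrPtr.loose               its 4 bytes are loose and a heap window, for EVERY heap
  §6  COLOUR MAPS: OWNERSHIP
      GifOK.scm_live, GifOK.icm_live
                                 the two objects of a colour map are live and different, the `Colors` field agrees: the
                                 precondition of `GifFreeMapObject.spec H rest frames m.colors (3 * m.count)`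
      Owns.free_scm, Owns.free_icm
                                 what is owned after `GifFreeMapObject` of the map: the forest with `scm := none` (`icm := none`)
      Owns.adopt_scm, Owns.adopt_icm
                                 what is owned after `GifMakeMapObject` (`MakeMapPost`): the forest with the new map
      Owns.map_front_live        the two objects of a colour map owned IN FRONT of a list (a map that is not the forest's `scm` /
                                 `icm`: the dropped slot's, a map under construction) are live and different
      Owns.free_map_front        what is owned after `GifFreeMapObject` of such a map: the list behind it
      Owns.map_obj_liveIn, Owns.map_colors_liveIn
                                 the two objects of an owned map `Owns H (Map.objs (some mp))` (the digest's ghost) as LIVE RANGES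
                                 `(mp.obj, 24)`, `(mp.colors, 3 · mp.count)`: what the checks of `map->…` / `Colors[i].…` take (`.accSmall`)
      Owns.map_inside            where these two objects are, AS NUMBERS (four inequalities, no `% 16` clause: safe in a walk's context)
      MapAt.sameExcept           `MapAt (some mp) p` through a footprint that misses the map object `[mp.obj, mp.obj + 24)`
  §7  THE FOREST: BOOKKEEPING
      Forest.SameButScm.refl, .SameButIcm.refl, .SameButSaved.refl, .SameButIcmSaved.refl, .SameButPend.refl
      Forest.SameButIcm.toIcmSaved, Forest.SameButSaved.toIcmSaved
      Forest.SameButScm.imgs, Forest.SameButIcm.imgs, Forest.SameButPend.imgs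
                                 `F'.imgs = F.imgs`
      Forest.imgs_some, Forest.imgs_none
                                 `F.imgs` from `F.saved`
      Forest.set_scm_eq, .set_icm_eq, .set_saved_eq, .set_pend_eq
                                 eta: `{ F with scm := m } = F` when `F.scm = m`
      Forest.complete_iff        `F.Complete ↔ ∀ g ∈ F.imgs, g.raster ≠ none`
      Forest.complete_of_imgs    the same counted images: still complete
      Forest.complete_snoc       one more counted image, with a raster: still complete
      Forest.complete_of_saved_none, Forest.complete_of_imgs_nil
                                 no array / no counted image: complete
  §8  THE NULL TESTS OF THE CODE
      live_base_ge               a live object lies at or above 200040H (so its pointer is not NULL)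
      MapAt.ptr_ne_zero, ExtsAt.ptr_ne_zero, SavedAt.ptr_ne_zero
                                 the pointer field of a `some` component is not 0 when its object is live
      GifOK.scm_null_iff, .icm_null_iff, .saved_null_iff, .pend_null_iff
                                 the pointer field of gif is 0 exactly when the forest's component is `none`
  §9  READS
      rd_zero_of_bytes           `n` zero bytes read as the number 0
  §10 A READER'S STEP AS A WHOLE
      Back.of_set_cursor         the post `Back` from a footprint of loose heap windows + windows inside the cursor's `cur`
  §11 THE READER IS MADE
      CursorOK.make              `CursorOK R mem` from the two fields as they were just stored: `cur = inB`, `end = inB + inN`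
-/
import Gif.Spec.ForestCarry
import Gif.Spec.Reader
namespace Gif.Spec
open X86 X86.User Asan ProgX.Base ProgX.Base.Spec

/-! ### 1. The measures and `LZOK` through a frame -/

/-- **The measure of the LZW main loop through a memory that agrees on what it reads**: the cursor `[R.cur, R.cur + 16)`, the byte
`Buf[0]` at `pv + 88`, and `CrntShiftState` at `[pv + 44, pv + 48)`. Used by the segments of DGifDecompressLine and
DGifDecompressInput that store elsewhere. -/
theorem mu_frame {R : Rd} {mem mem' : Mem} {pv : Nat} (hcur : Mem.EqOn R.cur (R.cur + 16) mem mem')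
    (hbuf0 : Mem.EqOn (pv + 88) (pv + 89) mem mem') (hstate : Mem.EqOn (pv + 44) (pv + 48) mem mem')
    (hc : R.cur + 16 < 2 ^ 64) (hp : pv + 89 < 2 ^ 64) : mu R mem' pv = mu R mem pv := by
  unfold mu
  rw [rem_frame hcur hc]
  simp only [gfield]
  rw [hbuf0.rd (pv + 88) 1 (by omega) (by omega) (by omega)]
  rw [hstate.rd (pv + 44) 4 (by omega) (by omega) (by omega)]

/-- **The measure of the LZW main loop through a footprint** every window of which misses the cursor, `pv.CrntShiftState` and
`pv.Buf[0]`. Used wherever a callee's or a segment's footprint is a list of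
windows: stores to `Stack`, `Suffix`, `Prefix`, the other LZW scalars, `Line`, the own stack. -/
theorem mu_sameExcept {R : Rd} {mem mem' : Mem} {ws : List Span} {pv : Nat} (hs : Mem.SameExcept ws mem mem')
    (hc : R.cur + 16 < 2 ^ 64) (hp : pv + 89 < 2 ^ 64)
    (hcur : ∀ w, w ∈ ws → w.hi ≤ R.cur ∨ R.cur + 16 ≤ w.lo)
    (hstate : ∀ w, w ∈ ws → w.hi ≤ pv + 44 ∨ pv + 48 ≤ w.lo)
    (hbuf0 : ∀ w, w ∈ ws → w.hi ≤ pv + 88 ∨ pv + 89 ≤ w.lo) : mu R mem' pv = mu R mem pv := by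
  apply mu_frame _ _ _ hc hp
  · apply hs.eqOn
    intro w hw
    have := hcur w hw
    omega
  · apply hs.eqOn
    intro w hw
    have := hbuf0 w hw
    omega
  · apply hs.eqOn
    intro w hw
    have := hstate w hw
    omega

/-- **`LZOK` through a footprint** every window of which misses `[pv + 8, pv + 48)` (the footprint form of `LZOK.frame`). Used
after every call of a reader (their footprints: `pv.Buf`, `pv.PixelCount`, an out-pointer, `gif.Error`, the cursor). -/
theorem LZOK.sameExcept {mem mem' : Mem} {pv : Nat} {ws : List Span} (h : LZOK mem pv) (hs : Mem.SameExcept ws mem mem')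
    (hp : pv + 48 < 2 ^ 64) (hd : ∀ w, w ∈ ws → w.hi ≤ pv + 8 ∨ pv + 48 ≤ w.lo) : LZOK mem' pv := by
  apply h.frame _ hp
  apply hs.eqOn
  intro w hw
  have := hd w hw
  omega

/-! ### 2. Footprints -/

/-- **The general form of dropping windows**: every window of the footprint is a window of the new footprint, or the two memories
agree on it anyway (it was not written after all, or the same bytes were written back, or it is empty). -/
theorem _root_.X86.User.Mem.SameExcept.shrink_eqOn {ws ws' : List Span} {m m' : Mem} (h : Mem.SameExcept ws m m')
    (hsub : ∀ w, w ∈ ws → w ∈ ws' ∨ Mem.EqOn w.lo w.hi m m') : Mem.SameExcept ws' m m' := by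
  intro a ha
  by_cases hin : ∃ w, w ∈ ws ∧ ¬ (w ∈ ws') ∧ w.lo ≤ a.toNat ∧ a.toNat < w.hi
  · obtain ⟨w, hw, hnot, h1, h2⟩ := hin
    rcases hsub w hw with hmem | he
    · exact absurd hmem hnot
    · exact he a h1 h2
  · apply h a
    intro w hw
    by_cases hmem : w ∈ ws'
    · exact ha w hmem
    · apply Classical.byContradiction
      intro hno
      apply hin
      refine ⟨w, hw, hmem, ?_, ?_⟩
      · omega
      · omega

/-- **Drop the first window of a footprint when the memories agree on it.** Used when a contract's footprint names a window the
path taken did not write (`gif.Error` on the GIF_OK path). -/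
theorem _root_.X86.User.Mem.SameExcept.drop_eqOn {w : Span} {ws : List Span} {m m' : Mem} (h : Mem.SameExcept (w :: ws) m m')
    (he : Mem.EqOn w.lo w.hi m m') : Mem.SameExcept ws m m' := by
  intro a ha
  by_cases hin : w.lo ≤ a.toNat ∧ a.toNat < w.hi
  · exact he a hin.1 hin.2
  · apply h a
    intro w' hw'
    rcases List.mem_cons.mp hw' with e | hr
    · rw [e]
      omega
    · exact ha w' hr

/-- **Drop the first window of a footprint when it is empty** (`w.hi ≤ w.lo`: a buffer of 0 bytes). -/
theorem _root_.X86.User.Mem.SameExcept.drop_empty {w : Span} {ws : List Span} {m m' : Mem} (h : Mem.SameExcept (w :: ws) m m')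
    (he : w.hi ≤ w.lo) : Mem.SameExcept ws m m' := by
  apply h.drop_eqOn
  intro a h1 h2
  omega

/-! ### 3. Loose windows and heap windows -/

/-- **A window inside a loose window is loose.** Used for a store of a few bytes into a buffer that is loose as a whole
(`Line[i]`, `Buf[i]`, one field of a window of a contract). -/
theorem Loose.sub {H : Heap} {F : Forest} {R : Rd} {w w' : Span} (h : Loose H F R w) (h1 : w.lo ≤ w'.lo) (h2 : w'.hi ≤ w.hi) :
    Loose H F R w' := by
  rcases h with hg | ⟨a, b⟩ | ⟨a, b⟩ | ⟨a, b⟩ | ⟨a, b⟩ | ⟨a, b⟩ | ⟨x, hx, a, b, n1, n2, n3⟩ | ⟨o, x, ho, hx, e, a, b⟩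
  · refine Or.inl ⟨?_, ?_, ?_⟩
    · intro x hx
      have := hg.1 x hx
      omega
    · have := hg.2.1
      omega
    · have := hg.2.2
      omega
  · exact Or.inr (Or.inl ⟨by omega, by omega⟩)
  · exact Or.inr (Or.inr (Or.inl ⟨by omega, by omega⟩))
  · exact Or.inr (Or.inr (Or.inr (Or.inl ⟨by omega, by omega⟩)))
  · exact Or.inr (Or.inr (Or.inr (Or.inr (Or.inl ⟨by omega, by omega⟩))))
  · exact Or.inr (Or.inr (Or.inr (Or.inr (Or.inr (Or.inl ⟨by omega, by omega⟩)))))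
  · exact Or.inr (Or.inr (Or.inr (Or.inr (Or.inr (Or.inr (Or.inl ⟨x, hx, by omega, by omega, n1, n2, n3⟩))))))
  · exact Or.inr (Or.inr (Or.inr (Or.inr (Or.inr (Or.inr (Or.inr ⟨o, x, ho, hx, e, by omega, by omega⟩))))))

/-- **A window inside a heap window is a heap window.** -/
theorem HeapWin.sub {H : Heap} {w w' : Span} (h : HeapWin H w) (h1 : w.lo ≤ w'.lo) (h2 : w'.hi ≤ w.hi) : HeapWin H w' := by
  unfold HeapWin at h ⊢
  rcases h with hout | ⟨x, hx, a, b⟩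
  · left
    omega
  · right
    exact ⟨x, hx, by omega, by omega⟩

/-- **A window inside one of the three ranges of scalar fields of gif is loose**: `[0, 24)` (SWidth … AspectByte), `[40, 64)`
(Image.Left … Interlace), `[96, 104)` (Error). Used for every store to a scalar field of gif. -/
theorem Loose.gifScalar {H : Heap} {F : Forest} {R : Rd} {w : Span}
    (h : (F.gif ≤ w.lo ∧ w.hi ≤ F.gif + 24) ∨ (F.gif + 40 ≤ w.lo ∧ w.hi ≤ F.gif + 64) ∨ (F.gif + 96 ≤ w.lo ∧ w.hi ≤ F.gif + 104)) :
    Loose H F R w := by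
  rcases h with h1 | h2 | h3
  · exact Or.inr (Or.inl h1)
  · exact Or.inr (Or.inr (Or.inl h2))
  · exact Or.inr (Or.inr (Or.inr (Or.inl h3)))

/-- **A window inside the body of pv is loose**: `[4, 64)` (FileHandle, the LZW scalars, CrntShiftDWord, PixelCount) or
`[80, 24936)` (Write, Buf, Stack, Suffix, Prefix, HashTable, gif89). Used for every store of the LZW functions. -/
theorem Loose.pvBody {H : Heap} {F : Forest} {R : Rd} {w : Span}
    (h : (F.pv + 4 ≤ w.lo ∧ w.hi ≤ F.pv + 64) ∨ (F.pv + 80 ≤ w.lo ∧ w.hi ≤ F.pv + 24936)) : Loose H F R w := by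
  rcases h with h1 | h2
  · exact Or.inr (Or.inr (Or.inr (Or.inr (Or.inl h1))))
  · exact Or.inr (Or.inr (Or.inr (Or.inr (Or.inr (Or.inl h2)))))

/-- An object of `scm` is an object of the forest. -/
theorem Forest.mem_owned_scm {F : Forest} {o : Nat × Nat} (ho : o ∈ Map.objs F.scm) : o ∈ F.owned := by
  unfold Forest.owned
  apply List.mem_cons_of_mem
  apply List.mem_cons_of_mem
  exact List.mem_append_left _ (List.mem_append_left _ (List.mem_append_left _ ho))

/-- An object of `icm` is an object of the forest. -/
theorem Forest.mem_owned_icm {F : Forest} {o : Nat × Nat} (ho : o ∈ Map.objs F.icm) : o ∈ F.owned := by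
  unfold Forest.owned
  apply List.mem_cons_of_mem
  apply List.mem_cons_of_mem
  exact List.mem_append_left _ (List.mem_append_left _ (List.mem_append_right _ ho))

/-- An object of `saved` (the array, an object of a counted image) is an object of the forest. -/
theorem Forest.mem_owned_saved {F : Forest} {o : Nat × Nat} (ho : o ∈ Saved.objs F.saved) : o ∈ F.owned := by
  unfold Forest.owned
  apply List.mem_cons_of_mem
  apply List.mem_cons_of_mem
  exact List.mem_append_left _ (List.mem_append_right _ ho)

/-- An object of `pend` (the array, the bytes of a counted block) is an object of the forest. -/
theorem Forest.mem_owned_pend {F : Forest} {o : Nat × Nat} (ho : o ∈ Exts.objs F.pend) : o ∈ F.owned := by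
  unfold Forest.owned
  apply List.mem_cons_of_mem
  apply List.mem_cons_of_mem
  exact List.mem_append_right _ ho

/-- **A window inside an owned object is a heap window** (`HeapWin.live` for an entry of the list). -/
theorem HeapWin.owned {H : Heap} {mem : Mem} {objs : List (Nat × Nat)} {w : Span} (hok : HeapOK H mem) (ho : Owns H objs)
    {o : Nat × Nat} (hin : o ∈ objs) (h1 : o.1 ≤ w.lo) (h2 : w.hi ≤ o.1 + o.2) : HeapWin H w :=
  HeapWin.live hok (ho.live o hin) h1 h2

/-- **A window inside gif is a heap window** (the companion of `Loose.gifScalar`). -/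
theorem HeapWin.gif {H : Heap} {F : Forest} {mem : Mem} {w : Span} (hok : HeapOK H mem) (ho : Owns H F.owned)
    (h1 : F.gif ≤ w.lo) (h2 : w.hi ≤ F.gif + 120) : HeapWin H w :=
  HeapWin.owned hok ho (o := (F.gif, 120)) List.mem_cons_self h1 h2

/-- **A window inside pv is a heap window** (the companion of `Loose.pvBody`). -/
theorem HeapWin.pv {H : Heap} {F : Forest} {mem : Mem} {w : Span} (hok : HeapOK H mem) (ho : Owns H F.owned)
    (h1 : F.pv ≤ w.lo) (h2 : w.hi ≤ F.pv + 24936) : HeapWin H w :=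
  HeapWin.owned hok ho (o := (F.pv, 24936)) (List.mem_cons_of_mem _ List.mem_cons_self) h1 h2

/-- **A window behind the structural prefix of a structural object, inside the object's size, is loose** (the `tail` case): `o` is
the structural window `(base, prefix length)`, `(o.1, n)` the owned object with that base. Its heap window: `HeapWin.owned` with
`hin`. The two uses are `Loose.savedTail` and `Loose.pendTail`. -/
theorem Loose.tail {H : Heap} {F : Forest} {R : Rd} {mem : Mem} {w : Span} (hok : HeapOK H mem) (ho : Owns H F.owned)
    {o : Nat × Nat} {n : Nat} (hs : o ∈ F.structs) (hin : (o.1, n) ∈ F.owned) (h1 : o.1 + o.2 ≤ w.lo) (h2 : w.hi ≤ o.1 + n) :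
    Loose H F R w := by
  obtain ⟨c, hlc⟩ := ho.live (o.1, n) hin
  have hsc := hok.size_le_cap hlc
  simp only at hsc
  refine Or.inr (Or.inr (Or.inr (Or.inr (Or.inr (Or.inr (Or.inr ⟨o, _, hs, hlc, rfl, h1, ?_⟩))))))
  simp only
  omega

/-- **The uncounted slots of the SavedImages array are loose** (and a heap window): `[arr + 56·length, arr + 56·cap)`. Used by
DGifGetImageDesc, which fills the slot behind the counted ones before it counts it. -/
theorem Loose.savedTail {H : Heap} {F : Forest} {R : Rd} {mem : Mem} {w : Span} (hok : HeapOK H mem) (ho : Owns H F.owned)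
    {s : Saved} (hs : F.saved = some s) (h1 : s.arr + 56 * s.imgs.length ≤ w.lo) (h2 : w.hi ≤ s.arr + 56 * s.cap) :
    Loose H F R w ∧ HeapWin H w := by
  have hstruct : (s.arr, 56 * s.imgs.length) ∈ F.structs := by
    apply carry_mem_structs_saved
    rw [hs]
    exact List.mem_cons_self
  have hown : (s.arr, 56 * s.cap) ∈ F.owned := by
    apply Forest.mem_owned_saved
    rw [hs]
    exact List.mem_cons_self
  refine ⟨Loose.tail hok ho hstruct hown h1 h2, HeapWin.owned hok ho hown ?_ h2⟩
  simp only
  omega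

/-- **The uncounted slots of the pending extension list are loose** (and a heap window): `[arr + 24·length, arr + 24·cap)`. Used by
GifAddExtensionBlock, which fills the block behind the counted ones. -/
theorem Loose.pendTail {H : Heap} {F : Forest} {R : Rd} {mem : Mem} {w : Span} (hok : HeapOK H mem) (ho : Owns H F.owned)
    {e : Exts} (hs : F.pend = some e) (h1 : e.arr + 24 * e.blocks.length ≤ w.lo) (h2 : w.hi ≤ e.arr + 24 * e.cap) :
    Loose H F R w ∧ HeapWin H w := by
  have hstruct : (e.arr, 24 * e.blocks.length) ∈ F.structs := by
    apply carry_mem_structs_pend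
    rw [hs]
    exact List.mem_cons_self
  have hown : (e.arr, 24 * e.cap) ∈ F.owned := by
    apply Forest.mem_owned_pend
    rw [hs]
    exact List.mem_cons_self
  refine ⟨Loose.tail hok ho hstruct hown h1 h2, HeapWin.owned hok ho hown ?_ h2⟩
  simp only
  omega

/-- **A loose window is a gap, or lies inside the capacity of ONE object of the heap** (gif, pv, a data object, a structural
object): the eight cases of `Loose`, brought to two. -/
theorem Loose.gap_or_inObj {H : Heap} {F : Forest} {R : Rd} {w : Span} (hl : Loose H F R w) (hp : Placed H F.owned) :
    Gap H R w ∨ ∃ x, x ∈ H.objs ∧ x.base ≤ w.lo ∧ w.hi ≤ x.base + x.cap := by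
  obtain ⟨xg, hxg, ebg, hcg⟩ := hp.at_ (F.gif, 120) List.mem_cons_self
  obtain ⟨xp, hxp, ebp, hcp⟩ := hp.at_ (F.pv, 24936) (List.mem_cons_of_mem _ List.mem_cons_self)
  simp only at ebg hcg ebp hcp
  rcases hl with hg | ⟨a, b⟩ | ⟨a, b⟩ | ⟨a, b⟩ | ⟨a, b⟩ | ⟨a, b⟩ | ⟨x, hx, a, b, _, _, _⟩ | ⟨o, x, _, hx, e, a, b⟩
  · exact Or.inl hg
  · exact Or.inr ⟨xg, hxg, by omega, by omega⟩
  · exact Or.inr ⟨xg, hxg, by omega, by omega⟩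
  · exact Or.inr ⟨xg, hxg, by omega, by omega⟩
  · exact Or.inr ⟨xp, hxp, by omega, by omega⟩
  · exact Or.inr ⟨xp, hxp, by omega, by omega⟩
  · exact Or.inr ⟨x, hx, a, b⟩
  · exact Or.inr ⟨x, hx, by omega, b⟩

/-- **A loose window misses the cursor** (it is a gap, or lies inside an object of the heap, and the cursor is a stack object).
Used to carry `rem`, `mu`, `CursorOK` over a loose footprint. -/
theorem Loose.off_cursor {H : Heap} {F : Forest} {R : Rd} {mem : Mem} {w : Span} (hl : Loose H F R w) (hok : HeapOK H mem)
    (hp : Placed H F.owned) (hcur : 0x700000 ≤ R.cur ∧ R.cur + 16 ≤ 0x800000) : w.hi ≤ R.cur ∨ R.cur + 16 ≤ w.lo := by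
  rcases hl.gap_or_inObj hp with hg | ⟨x, hx, h1, h2⟩
  · exact hg.2.1
  · have hoff := hok.offStack
    have hr := hok.obj_range hx
    have hi := hok.obj_inside hx
    omega

/-- **A loose window misses the image's constants** `[141300H, 14139AH)` (a gap does by definition; the heap lies above 200000H). -/
theorem Loose.off_consts {H : Heap} {F : Forest} {R : Rd} {mem : Mem} {w : Span} (hl : Loose H F R w) (hok : HeapOK H mem)
    (hp : Placed H F.owned) : w.hi ≤ 0x141300 ∨ 0x14139a ≤ w.lo := by
  rcases hl.gap_or_inObj hp with hg | ⟨x, hx, h1, h2⟩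
  · exact hg.2.2
  · have hi := hok.obj_inside hx
    omega

/-- **The reader's measure through a footprint of loose windows** (a loose window never meets the cursor). Used for the clause
`rem R v.mem ≤ rem R e.mem` of `Back` over the stores and calls that do not read input. -/
theorem rem_loose {H : Heap} {F : Forest} {R : Rd} {mem₀ mem mem' : Mem} {ws : List Span} (hs : Mem.SameExcept ws mem mem')
    (hl : ∀ w, w ∈ ws → Loose H F R w) (hok : HeapOK H mem₀) (hp : Placed H F.owned)
    (hcur : 0x700000 ≤ R.cur ∧ R.cur + 16 ≤ 0x800000) : rem R mem' = rem R mem := by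
  apply rem_sameExcept hs (by omega)
  intro w hw
  exact (hl w hw).off_cursor hok hp hcur

/-- **`CursorOK` through a footprint of loose windows.** -/
theorem CursorOK.loose {H : Heap} {F : Forest} {R : Rd} {mem₀ mem mem' : Mem} {ws : List Span} (h : CursorOK R mem)
    (hs : Mem.SameExcept ws mem mem') (hl : ∀ w, w ∈ ws → Loose H F R w) (hok : HeapOK H mem₀) (hp : Placed H F.owned)
    (hcur : 0x700000 ≤ R.cur ∧ R.cur + 16 ≤ 0x800000) : CursorOK R mem' := by
  apply h.sameExcept hs (by omega)
  intro w hw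
  exact (hl w hw).off_cursor hok hp hcur

/-- **`Consts` through a footprint of loose windows.** -/
theorem Consts.loose {H : Heap} {F : Forest} {R : Rd} {mem₀ mem mem' : Mem} {ws : List Span} (h : Consts mem)
    (hs : Mem.SameExcept ws mem mem') (hl : ∀ w, w ∈ ws → Loose H F R w) (hok : HeapOK H mem₀) (hp : Placed H F.owned) :
    Consts mem' := by
  apply h.sameExcept hs
  intro w hw
  exact (hl w hw).off_consts hok hp

/-- **The footprint of `free.spec H rest frames n` entered with `rdi = p` is loose for every forest**: a stack window `[lo, hi)` below
the cursor (the callee's 24 bytes and the pushed return address, or the caller's merged window), the state word of the object's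
header, the object's shadow (`shadowSpan p (p + n)`, unfolded: the form `u_same` delivers after `simp only [shadowSpan, …] at w_same`).
For the step after a `free` whose object the forest does not own (any more): `Shape`, `rem`, `CursorOK`, `Consts` go through it
(`Shape.sameExcept`, `rem_loose`), whatever the forest owns. -/
theorem Loose.free {H : Heap} {F : Forest} {R : Rd} {mem : Mem} {p n lo hi : Nat} (hok : HeapOK H mem)
    (hcur : 0x700000 ≤ R.cur ∧ R.cur + 16 ≤ 0x800000) (hl : H.Live p n) (hlo : 0x700000 ≤ lo) (hhi : hi ≤ R.cur) :
    ∀ w, w ∈ [(⟨lo, hi⟩ : Span), ⟨p - 24, p - 16⟩, ⟨0xC00000 + p / 8, 0xC00000 + (p + n + 7) / 8⟩] → Loose H F R w := by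
  obtain ⟨c, hc⟩ := hl
  intro w hw
  simp only [List.mem_cons, List.not_mem_nil, or_false] at hw
  rcases hw with rfl | rfl | rfl
  · exact Loose.stack hok (by simp only; omega) (by simp only; omega) (by simp only; omega)
  · exact Loose.header hok hcur hc (by simp only; omega) (by simp only; omega)
  · exact Loose.shadow hok hcur.2 (by simp only; omega)

/-- **The footprint of `GifFreeMapObject.spec H rest frames colors n` entered with `rdi = obj` is loose for every forest**: a stack
window `[lo, hi)` below the cursor (the callee's 48 bytes and the pushed return address), the state words of the two headers, the
shadow of the two objects (`shadowSpan`, unfolded: the form `u_same` delivers). The two-object sibling of `Loose.free`; for the step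
after `GifFreeMapObject` of a map the forest does not own (any more). -/
theorem Loose.freeMap {H : Heap} {F : Forest} {R : Rd} {mem : Mem} {obj colors n lo hi : Nat} (hok : HeapOK H mem)
    (hcur : 0x700000 ≤ R.cur ∧ R.cur + 16 ≤ 0x800000) (hl1 : H.Live obj 24) (hl2 : H.Live colors n)
    (hlo : 0x700000 ≤ lo) (hhi : hi ≤ R.cur) :
    ∀ w, w ∈ [(⟨lo, hi⟩ : Span), ⟨colors - 24, colors - 16⟩, ⟨0xC00000 + colors / 8, 0xC00000 + (colors + n + 7) / 8⟩,
      ⟨obj - 24, obj - 16⟩, ⟨0xC00000 + obj / 8, 0xC00000 + (obj + 24 + 7) / 8⟩] → Loose H F R w := by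
  obtain ⟨c1, hc1⟩ := hl1
  obtain ⟨c2, hc2⟩ := hl2
  intro w hw
  simp only [List.mem_cons, List.not_mem_nil, or_false] at hw
  rcases hw with rfl | rfl | rfl | rfl | rfl
  · exact Loose.stack hok (by simp only; omega) (by simp only; omega) (by simp only; omega)
  · exact Loose.header hok hcur hc2 (by simp only; omega) (by simp only; omega)
  · exact Loose.shadow hok hcur.2 (by simp only; omega)
  · exact Loose.header hok hcur hc1 (by simp only; omega) (by simp only; omega)
  · exact Loose.shadow hok hcur.2 (by simp only; omega)

/-! ### 4. Buffers and out-pointers -/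

/-- **A buffer argument lies above the return-address slot** of the function entered at `e` with it: a store through it meets
neither that function's stack nor its return address. It is the field `…_above` of the assertions of the readers' segments. -/
theorem BufOK.above {H : Heap} {rest : List Obj} {frames : List (Nat × FrameLayout)} {F : Forest} {R : Rd} {e : State} {b n : Nat}
    (hb : BufOK H rest frames F R b n) (hn : 1 ≤ n) (hpre : HeapPre H rest frames e)
    (htop : (e.reg .rsp).toNat + 8 ≤ 0x800000) : (e.reg .rsp).toNat + 8 ≤ b := by
  obtain ⟨o, ho, h1, h2⟩ := hb.live
  have hhigh := hb.high
  rcases List.mem_append.mp ho with hst | hoth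
  · obtain ⟨bF, hbF, g1, _⟩ := ShadowInv.stackObj_gran hpre.inv.shadow.stack hst
    obtain ⟨_, a8, atop, _, _⟩ := hpre.inv.shadow.stack.active bF hbF
    unfold Obj.gLo at g1
    omega
  · rcases List.mem_append.mp hoth with hheap | hrest
    · obtain ⟨⟨c, hl⟩, _⟩ := Heap.live_of_mem_liveObjs hheap
      have hr := hpre.inv.heap.obj_range hl
      have hbase := hpre.base
      simp only at hr
      omega
    · have hoff := hpre.inv.shadow.off o (List.mem_append_right _ hrest)
      unfold OffStack at hoff
      omega

/-- **An out-pointer lies above the return-address slot** of the function entered at `e` with it; `htop` is not needed: the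
range ends below 800000H. -/
theorem OutPtr.above {H : Heap} {rest : List Obj} {frames : List (Nat × FrameLayout)} {F : Forest} {R : Rd} {e : State} {b n : Nat}
    (hb : OutPtr H rest frames F R b n) (hn : 1 ≤ n) (hpre : HeapPre H rest frames e) : (e.reg .rsp).toNat + 8 ≤ b := by
  have hhi := hpre.inv.shadow.stack.hi
  exact hb.buf.above hn hpre hhi

/-- **A live range stays live under one more active frame** (the callee's list of frames is the caller's with its own in front). -/
theorem _root_.ProgX.Base.LiveIn.push_frame {others : List Obj} {frames : List (Nat × FrameLayout)} {a n : Nat}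
    (h : LiveIn others frames a n) (bF : Nat × FrameLayout) : LiveIn others (bF :: frames) a n := by
  obtain ⟨o, ho, h1, h2⟩ := h
  obtain ⟨base, Fr⟩ := bF
  refine ⟨o, ?_, h1, h2⟩
  rcases List.mem_append.mp ho with hs | hoth
  · apply List.mem_append_left
    rw [stackObjs_cons]
    exact List.mem_append_right _ hs
  · exact List.mem_append_right _ hoth

/-- **A caller's buffer under one more active frame**: what a protected function hands to ITS callee when it passes a buffer of its
caller on (`Loose` and `HeapWin` do not mention the frames: only `live` changes). -/
theorem BufOK.push {H : Heap} {rest : List Obj} {frames : List (Nat × FrameLayout)} {F : Forest} {R : Rd} {b n : Nat}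
    (h : BufOK H rest frames F R b n) (bF : Nat × FrameLayout) : BufOK H rest (bF :: frames) F R b n :=
  ⟨h.live.push_frame bF, h.loose, h.win, h.high⟩

/-- **A caller's out-pointer under one more active frame** (DGifGetExtension passes `Extension` on to DGifGetExtensionNext). -/
theorem OutPtr.push {H : Heap} {rest : List Obj} {frames : List (Nat × FrameLayout)} {F : Forest} {R : Rd} {b n : Nat}
    (h : OutPtr H rest frames F R b n) (bF : Nat × FrameLayout) : OutPtr H rest (bF :: frames) F R b n :=
  ⟨h.buf.push bF, h.low⟩

/-- **A sub-window of a buffer is a buffer**: `[b + i, b + i + k)` with `i + k ≤ n`. What `mem_read` needs for the `k ≤ n` bytes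
it copies, DGifDecompressLine for `Line[i]`, DGifGetLine for the rest of the line. -/
theorem BufOK.sub {H : Heap} {rest : List Obj} {frames : List (Nat × FrameLayout)} {F : Forest} {R : Rd} {b n : Nat}
    (h : BufOK H rest frames F R b n) (i k : Nat) (hik : i + k ≤ n) : BufOK H rest frames F R (b + i) k := by
  have hhigh := h.high
  refine ⟨h.live.sub (b + i) k (by omega) (by omega), ?_, ?_, by omega⟩
  · apply h.loose.sub
    · show b ≤ b + i
      omega
    · show b + i + k ≤ b + n
      omega
  · apply h.win.sub
    · show b ≤ b + i
      omega
    · show b + i + k ≤ b + n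
      omega

/-- **A sub-window of an out-pointer's range is an out-pointer's range.** -/
theorem OutPtr.sub {H : Heap} {rest : List Obj} {frames : List (Nat × FrameLayout)} {F : Forest} {R : Rd} {b n : Nat}
    (h : OutPtr H rest frames F R b n) (i k : Nat) (hik : i + k ≤ n) : OutPtr H rest frames F R (b + i) k := by
  have hlow := h.low
  exact ⟨h.buf.sub i k hik, by omega⟩

/-- **AN OBJECT OF THE FUNCTION'S OWN PROTECTED FRAME IS AN OUT-POINTER FOR ITS CALLEES**, geometric form. `hinv` is the heap's
invariant of the body (the own frame `(base, Fr)` pushed: `Body.inv`), for the PRESENT heap; `hcur` says the frame ends at or below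
the cursor (`OutPtr.own` derives it from the entry state); `ho` names the object, `a = base + off`, `n = size`. For a concrete frame
state it with its NUMBERS in a `have` (`omega` does not see through `fo.size`): for the first object of `Gif.Frames.DGifGetWord`,
`have ho : (⟨(e.reg .rsp).toNat - 88 + 32, 2, .stack⟩ : Obj) ∈ Gif.Frames.DGifGetWord.objsAt ((e.reg .rsp).toNat - 88) :=
List.mem_cons_self` (the second object: `List.mem_cons_of_mem _ List.mem_cons_self`). -/
theorem OutPtr.frameObj {H : Heap} {rest : List Obj} {frames : List (Nat × FrameLayout)} {F : Forest} {R : Rd} {base top : Nat}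
    {Fr : FrameLayout} {mem : Mem} {a n : Nat} (hinv : HeapInv H rest ((base, Fr) :: frames) top mem)
    (hcur : base + Fr.size ≤ R.cur) (ho : (⟨a, n, .stack⟩ : Obj) ∈ Fr.objsAt base) :
    OutPtr H rest ((base, Fr) :: frames) F R a n := by
  obtain ⟨hF, hb8, htop, hhi, _⟩ := hinv.shadow.stack.active (base, Fr) List.mem_cons_self
  simp only at hF hb8 htop hhi
  have hlo := hinv.shadow.stack.lo
  have hoff := hinv.heap.offStack
  have hroom := hinv.heap.room
  obtain ⟨fo, hfo, e⟩ := FrameLayout.mem_objsAt ho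
  have ea : a = base + fo.off := congrArg Obj.base e
  have en : n = fo.size := congrArg Obj.size e
  obtain ⟨_, _, _, _, _, _, hobjs, _⟩ := hF
  obtain ⟨_, hfit, _, _⟩ := hobjs fo hfo
  refine ⟨⟨?_, ?_, ?_, by omega⟩, by omega⟩
  · refine ⟨⟨a, n, .stack⟩, List.mem_append_left _ ?_, Nat.le_refl _, Nat.le_refl _⟩
    rw [stackObjs_cons]
    exact List.mem_append_left _ ho
  · apply Loose.stack hinv.heap
    · show 0x700000 ≤ a
      omega
    · show a + n ≤ 0x800000
      omega
    · show a + n ≤ R.cur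
      omega
  · apply HeapWin.offHeap hinv.heap
    show a + n ≤ H.base ∨ H.limit ≤ a
    omega

/-- **AN OBJECT OF THE FUNCTION'S OWN PROTECTED FRAME IS AN OUT-POINTER FOR ITS CALLEES**, from what a segment's assertion holds:
`hpre`, `hctx`: `HeapPre` and `Ctx` at the entry state `e` (`Body.pre`: `Env` at `e`; the entry's heap `H₀` may differ from the
present heap `H`); `hinv`: the heap's invariant of the body with the own frame pushed (`Body.inv`); `hb`: the frame ends at or
below the return-address slot (`base = rsp₀ − raOff`, `size ≤ raOff`: `by simp only [Gif.Frames.<fn>]; omega`, with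
`hinv.shadow.stack.lo` in the context for `raOff ≤ rsp₀`). The cursor is a stack object of a caller, at or above `rsp₀ + 8`
(`Ctx.cursor_range`). -/
theorem OutPtr.own {H H₀ : Heap} {rest : List Obj} {frames : List (Nat × FrameLayout)} {F : Forest} {R : Rd} {e : State}
    {base top : Nat} {Fr : FrameLayout} {mem : Mem} {a n : Nat} (hpre : HeapPre H₀ rest frames e) (hctx : Ctx rest frames R)
    (hinv : HeapInv H rest ((base, Fr) :: frames) top mem) (hb : base + Fr.size ≤ (e.reg .rsp).toNat + 8)
    (ho : (⟨a, n, .stack⟩ : Obj) ∈ Fr.objsAt base) : OutPtr H rest ((base, Fr) :: frames) F R a n := by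
  have hc := hctx.cursor_range hpre.inv.shadow
  exact OutPtr.frameObj hinv (by omega) ho

/-- **A range inside an object of the own protected frame is a buffer for a callee** (`InternalRead(gif, &Buf, 1)`,
`InternalRead(gif, c, 2)`): `OutPtr.own`, then `BufOK.sub`. The range `[b, b + k)` is given by two inequalities against the object
`[a, a + n)`, for `omega` (`b` may be the callee's argument register: `(s.reg .rsi).toNat`, the bounds by `rw [w_rsi]; u_omega`). -/
theorem BufOK.own {H H₀ : Heap} {rest : List Obj} {frames : List (Nat × FrameLayout)} {F : Forest} {R : Rd} {e : State}
    {base top : Nat} {Fr : FrameLayout} {mem : Mem} {a n : Nat} (hpre : HeapPre H₀ rest frames e) (hctx : Ctx rest frames R)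
    (hinv : HeapInv H rest ((base, Fr) :: frames) top mem) (hb : base + Fr.size ≤ (e.reg .rsp).toNat + 8)
    (ho : (⟨a, n, .stack⟩ : Obj) ∈ Fr.objsAt base) {b k : Nat} (h1 : a ≤ b) (h2 : b + k ≤ a + n) :
    BufOK H rest ((base, Fr) :: frames) F R b k := by
  have hsub := (OutPtr.own (F := F) hpre hctx hinv hb ho).buf.sub (b - a) k (by omega)
  have eb : a + (b - a) = b := by omega
  rw [eb] at hsub
  exact hsub

/-- **A range inside an object of `rest` is live under every heap and every list of frames.** The driver's precondition states its
input and its output as `LiveIn rest [] a n` (no heap, no frame); a callee asks for `LiveIn (H'.liveObjs ++ rest) frames' a n` with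
the heap and the frames of the moment: `hl.of_rest H' _`. -/
theorem _root_.ProgX.Base.LiveIn.of_rest {rest : List Obj} {a n : Nat} (h : LiveIn rest [] a n) (H : Heap)
    (frames : List (Nat × FrameLayout)) : LiveIn (H.liveObjs ++ rest) frames a n := by
  apply h.mono
  intro o ho
  rcases List.mem_append.mp ho with hs | hr
  · exact absurd hs List.not_mem_nil
  · exact List.mem_append_right _ (List.mem_append_right _ hr)

/-- **A range inside an object of `rest` does not meet the stack region** `[700000H, 800000H)`: every object of `rest` is off the
stack (`ShadowInv.off`). What `memcpy` from / to a local asks about an overlap, and what keeps a callee's window `[a, a + n)` away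
from the saved registers. The result is a disjunction: leave it in the context, `u_omega`, `u_same`, `u_frame` split it. -/
theorem _root_.ProgX.Base.LiveIn.rest_offStack {H : Heap} {rest : List Obj} {frames : List (Nat × FrameLayout)} {top : Nat}
    {mem : Mem} {a n : Nat} (h : LiveIn rest [] a n) (hinv : HeapInv H rest frames top mem) :
    a + n ≤ 0x700000 ∨ 0x800000 ≤ a := by
  obtain ⟨o, ho, k1, k2⟩ := h
  have ho' : o ∈ rest := by
    rcases List.mem_append.mp ho with hs | hr
    · exact absurd hs List.not_mem_nil
    · exact hr
  have hoff := hinv.shadow.off o (List.mem_append_right _ ho')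
  unfold OffStack at hoff
  omega

/-! ### 5. The error out-pointer -/

/-- **`*Error` is live under every heap and with one more frame pushed** (the general form of `DGifOpen.errLive`): it lies in the
stack region, so the object of `ErrPtr`'s `LiveIn` is a stack object of the caller's frames (a heap object lies off the stack, an
object of `rest` too). What the check `__asan_store4_noabort` of every error exit asks, whatever the heap is by then. -/
theorem ErrPtr.liveIn {H : Heap} {rest : List Obj} {frames : List (Nat × FrameLayout)} {R : Rd} {p top : Nat} {mem : Mem}
    (h : ErrPtr H rest frames R p) (hp : p ≠ 0) (hinv : HeapInv H rest frames top mem) (H' : Heap) (bF : Nat × FrameLayout) :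
    LiveIn (H'.liveObjs ++ rest) (bF :: frames) p 4 := by
  rcases h with h0 | ⟨hl, hlo, hhi, _⟩
  · exact absurd h0 hp
  · obtain ⟨o, ho, k1, k2⟩ := hl
    obtain ⟨base, Fr⟩ := bF
    rcases List.mem_append.mp ho with hs | hoth
    · refine ⟨o, List.mem_append_left _ ?_, k1, k2⟩
      rw [stackObjs_cons]
      exact List.mem_append_right _ hs
    · exfalso
      rcases List.mem_append.mp hoth with hheap | hr
      · obtain ⟨⟨c, hlive⟩, _⟩ := Heap.live_of_mem_liveObjs hheap
        have h1 := hinv.heap.obj_range hlive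
        have h2 := hinv.heap.offStack
        have h3 := hinv.heap.room
        have h4 := hinv.heap.size_le_cap hlive
        simp only at h1 h4
        omega
      · have hoff := hinv.shadow.off o (List.mem_append_right _ hr)
        unfold OffStack at hoff
        omega

/-- **The 4 bytes of `*Error` are loose and a heap window, for every heap `H'` and forest `F`** (a stack address off the cursor):
the store `*Error = code` keeps `GifOK` and the heap's invariant. -/
theorem ErrPtr.loose {H H' : Heap} {rest : List Obj} {frames : List (Nat × FrameLayout)} {R : Rd} {p : Nat} {mem : Mem}
    (h : ErrPtr H rest frames R p) (hp : p ≠ 0) (hok : HeapOK H' mem) (F : Forest) :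
    Loose H' F R ⟨p, p + 4⟩ ∧ HeapWin H' ⟨p, p + 4⟩ := by
  rcases h with h0 | ⟨_, hlo, hhi, hoffc⟩
  · exact absurd h0 hp
  · have hoff := hok.offStack
    have hout : p + 4 ≤ H'.base ∨ H'.limit ≤ p := by omega
    refine ⟨Loose.offHeap hok hout ?_ ?_, HeapWin.offHeap hok hout⟩
    · show p + 4 ≤ R.cur ∨ R.cur + 16 ≤ p
      exact hoffc
    · show p + 4 ≤ 0x141300 ∨ 0x14139a ≤ p
      omega

/-! ### 6. Colour maps: ownership -/

/-- What is owned, with the two objects of `scm` in front. -/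
private theorem Owns.scm_front_aux {H : Heap} {F : Forest} (h : Owns H F.owned) {m : Map} (hm : F.scm = some m) :
    Owns H ((m.obj, 24) :: (m.colors, 3 * m.count) :: F.ownedButScm) := by
  have h1 := h.perm (Forest.owned_scm F)
  rw [hm] at h1
  exact h1

/-- What is owned, with the two objects of `icm` in front. -/
private theorem Owns.icm_front_aux {H : Heap} {F : Forest} (h : Owns H F.owned) {m : Map} (hm : F.icm = some m) :
    Owns H ((m.obj, 24) :: (m.colors, 3 * m.count) :: F.ownedButIcm) := by
  have h1 := h.perm (Forest.owned_icm F)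
  rw [hm] at h1
  exact h1

/-- **The screen colour map's two objects are live and different, and its `Colors` field agrees**: exactly the non-NULL arm of the
precondition of `GifFreeMapObject.spec H rest frames m.colors (3 * m.count)` with `rdi = m.obj` (DGifCloseFile, DGifGetScreenDesc). -/
theorem GifOK.scm_live {H : Heap} {F : Forest} {R : Rd} {mem : Mem} (h : GifOK H F R mem) {m : Map} (hm : F.scm = some m) :
    H.Live m.obj 24 ∧ H.Live m.colors (3 * m.count) ∧ m.colors ≠ m.obj ∧ ColorMapObject.Colors mem m.obj = m.colors := by
  have hfront := h.owns.scm_front_aux hm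
  obtain ⟨hl1, hrest, hne⟩ := hfront.of_cons
  obtain ⟨hl2, _, _⟩ := hrest.of_cons
  have hshape := h.shape.scm
  rw [hm] at hshape
  obtain ⟨_, _, hcol, _, _⟩ := hshape
  refine ⟨hl1, hl2, ?_, hcol⟩
  intro e
  exact hne (m.colors, 3 * m.count) List.mem_cons_self e.symm

/-- **The image colour map's two objects are live and different, and its `Colors` field agrees** (`GifFreeMapObject` at
DGifGetImageHeader l.380, DGifCloseFile). -/
theorem GifOK.icm_live {H : Heap} {F : Forest} {R : Rd} {mem : Mem} (h : GifOK H F R mem) {m : Map} (hm : F.icm = some m) :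
    H.Live m.obj 24 ∧ H.Live m.colors (3 * m.count) ∧ m.colors ≠ m.obj ∧ ColorMapObject.Colors mem m.obj = m.colors := by
  have hfront := h.owns.icm_front_aux hm
  obtain ⟨hl1, hrest, hne⟩ := hfront.of_cons
  obtain ⟨hl2, _, _⟩ := hrest.of_cons
  have hshape := h.shape.icm
  rw [hm] at hshape
  obtain ⟨_, _, hcol, _, _⟩ := hshape
  refine ⟨hl1, hl2, ?_, hcol⟩
  intro e
  exact hne (m.colors, 3 * m.count) List.mem_cons_self e.symm

/-- **What is owned after `GifFreeMapObject(gif->SColorMap)`**: the heap of its post (`free(Colors)`, then `free(Object)`) owns the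
forest without `scm`. -/
theorem Owns.free_scm {H : Heap} {F : Forest} (h : Owns H F.owned) {m : Map} (hm : F.scm = some m) :
    Owns ((H.release m.colors).release m.obj) ({ F with scm := none } : Forest).owned := by
  have hfront := h.scm_front_aux hm
  have hswap : Owns H ((m.colors, 3 * m.count) :: (m.obj, 24) :: F.ownedButScm) := hfront.perm (List.Perm.swap _ _ _)
  have h1 := hswap.release_head
  have h2 := h1.release_head
  have e : ({ F with scm := none } : Forest).owned = F.ownedButScm := rfl
  rw [e]
  exact h2

/-- **What is owned after `GifFreeMapObject(gif->Image.ColorMap)`**: the forest without `icm`. -/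
theorem Owns.free_icm {H : Heap} {F : Forest} (h : Owns H F.owned) {m : Map} (hm : F.icm = some m) :
    Owns ((H.release m.colors).release m.obj) ({ F with icm := none } : Forest).owned := by
  have hfront := h.icm_front_aux hm
  have hswap : Owns H ((m.colors, 3 * m.count) :: (m.obj, 24) :: F.ownedButIcm) := hfront.perm (List.Perm.swap _ _ _)
  have h1 := hswap.release_head
  have h2 := h1.release_head
  have hperm := Forest.owned_icm ({ F with icm := none } : Forest)
  exact h2.perm hperm.symm

/-- **The two objects of a colour map owned in front of `objs` are live and different**: with `MapAt (some m) p mem` this is the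
non-NULL arm of the precondition of `GifFreeMapObject.spec H rest frames m.colors (3 * m.count)` for `rdi = m.obj`. The form of
`GifOK.scm_live` / `GifOK.icm_live` for a map that is NOT a component of the forest (the dropped slot's map of
DGifDecreaseImageCounter, a map owned besides the forest's objects). -/
theorem Owns.map_front_live {H : Heap} {m : Map} {objs : List (Nat × Nat)} (h : Owns H (Map.objs (some m) ++ objs)) :
    H.Live m.obj 24 ∧ H.Live m.colors (3 * m.count) ∧ m.colors ≠ m.obj := by
  have hfront : Owns H ((m.obj, 24) :: (m.colors, 3 * m.count) :: objs) := h
  obtain ⟨hl1, hrest, hne⟩ := hfront.of_cons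
  obtain ⟨hl2, _, _⟩ := hrest.of_cons
  refine ⟨hl1, hl2, ?_⟩
  intro e
  exact hne (m.colors, 3 * m.count) List.mem_cons_self e.symm

/-- **What is owned after `GifFreeMapObject` of a colour map owned in front of `objs`**: the heap of its post (`free(Colors)`, then
`free(Object)`) owns `objs`. The form of `Owns.free_scm` / `Owns.free_icm` for a map that is not a component of the forest. -/
theorem Owns.free_map_front {H : Heap} {m : Map} {objs : List (Nat × Nat)} (h : Owns H (Map.objs (some m) ++ objs)) :
    Owns ((H.release m.colors).release m.obj) objs := by
  have hfront : Owns H ((m.obj, 24) :: (m.colors, 3 * m.count) :: objs) := h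
  have hswap : Owns H ((m.colors, 3 * m.count) :: (m.obj, 24) :: objs) := hfront.perm (List.Perm.swap _ _ _)
  exact hswap.release_head.release_head

/-- **The map object of an owned map is a live range** (`Owns H (Map.objs (some mp))` is the third clause of `digest_map.spec.pre`;
`digest_file.owns_scm` / `img_parts` give it for the forest's maps): the checks of the loads `map->ColorCount`, `->BitsPerPixel`,
`->SortFlag`, `->Colors` are `(h.map_obj_liveIn rest frames).accSmall …`. -/
theorem Owns.map_obj_liveIn {H : Heap} {mp : Map} (h : Owns H (Map.objs (some mp))) (rest : List Obj)
    (frames : List (Nat × FrameLayout)) : LiveIn (H.liveObjs ++ rest) frames mp.obj 24 :=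
  h.liveIn (o := (mp.obj, 24)) List.mem_cons_self rest frames (Nat.le_refl _) (Nat.le_refl _)

/-- **The colour array of an owned map is a live range**: `3 · count` bytes at `Colors` (the checks of `Colors[i].Red / .Green /
.Blue`: `3 · i + 2 < 3 · count`). -/
theorem Owns.map_colors_liveIn {H : Heap} {mp : Map} (h : Owns H (Map.objs (some mp))) (rest : List Obj)
    (frames : List (Nat × FrameLayout)) : LiveIn (H.liveObjs ++ rest) frames mp.colors (3 * mp.count) :=
  h.liveIn (o := (mp.colors, 3 * mp.count)) (List.mem_cons_of_mem _ List.mem_cons_self) rest frames (Nat.le_refl _) (Nat.le_refl _)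

/-- **Where the two objects of an owned map are**, as numbers: in the heap's region `[800040H, C00000H)`, above the stack. With the
four inequalities in the context the walker reads a field of the map THROUGH a pushed return address, and `u_omega` / `v_side`
place every access. (`Owns.inside` has a `% 16` clause that must not reach `omega`: it is dropped here.) -/
theorem Owns.map_inside {H : Heap} {mp : Map} {mem : Mem} (h : Owns H (Map.objs (some mp))) (hok : HeapOK H mem)
    (hbase : H.base = 0x800000) :
    0x800040 ≤ mp.obj ∧ mp.obj + 56 ≤ 0xC00000 ∧ 0x800040 ≤ mp.colors ∧ mp.colors + 3 * mp.count + 32 ≤ 0xC00000 := by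
  have hoin := h.inside hok (o := (mp.obj, 24)) List.mem_cons_self
  have hcin := h.inside hok (o := (mp.colors, 3 * mp.count)) (List.mem_cons_of_mem _ List.mem_cons_self)
  simp only at hoin hcin
  rw [hbase] at hoin hcin
  have h1 := hoin.1
  have h2 := hoin.2.2.2.2
  have h3 := hcin.1
  have h4 := hcin.2.2.2.2
  omega

/-- **The fields of a colour map through a footprint that misses the map object** `[mp.obj, mp.obj + 24)`: the form a walk has at
its exit (`hsame : Mem.SameExcept ws v.mem s.mem`; `MapAt.frame` asks for `EqOn` per structure instead). -/
theorem MapAt.sameExcept {mp : Map} {p : Nat} {ws : List Span} {mem mem' : Mem} (hmap : MapAt (some mp) p mem)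
    (hsame : Mem.SameExcept ws mem mem') (hlt : mp.obj + 24 < 2 ^ 64)
    (hd : ∀ w, w ∈ ws → mp.obj + 24 ≤ w.lo ∨ w.hi ≤ mp.obj) : MapAt (some mp) p mem' := by
  refine hmap.frame ?_ ?_
  · intro o ho
    have eo : o = (mp.obj, 24) := List.mem_singleton.mp ho
    subst eo
    exact hsame.eqOn _ _ hd
  · intro x hx
    have ex : x = mp := (Option.some.inj hx).symm
    subst ex
    exact hlt

/-- Two new live objects at or above the old bump pointer, in front of a list of objects of the old heap. -/
private theorem Owns.adopt_aux {H H' : Heap} {objs : List (Nat × Nat)} {mem : Mem} (h : Owns H objs) (hok : HeapOK H mem)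
    (hg : H.Grew H') {obj colors n : Nat} (hl1 : H'.Live obj 24) (hl2 : H'.Live colors n) (hn1 : H.next ≤ obj)
    (hn2 : H.next ≤ colors) (hne : colors ≠ obj) : Owns H' ((obj, 24) :: (colors, n) :: objs) := by
  have h1 : Owns H' ((colors, n) :: objs) := h.cons_grew hok hg hl2 hn2
  refine h1.cons hl1 ?_
  intro x hx e
  rcases List.mem_cons.mp hx with ex | hin
  · rw [ex] at e
    exact hne e.symm
  · obtain ⟨cx, hlx⟩ := h.live x hin
    have := hok.next_above hlx
    simp only at this e
    omega

/-- **What is owned after `GifMakeMapObject` for the screen colour map** (`MakeMapPost`: the grown heap `H'`, the two new live objects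
at or above the old bump pointer): the forest with the new map. (A map the forest had before is dropped from the list: no
hypothesis `F.scm = none` is needed.) -/
theorem Owns.adopt_scm {H H' : Heap} {F : Forest} {mem : Mem} (h : Owns H F.owned) (hok : HeapOK H mem) (hg : H.Grew H')
    {obj colors c : Nat} (hl1 : H'.Live obj 24) (hl2 : H'.Live colors (3 * c)) (hn1 : H.next ≤ obj) (hn2 : H.next ≤ colors)
    (hne : colors ≠ obj) : Owns H' ({ F with scm := some ⟨obj, colors, c⟩ } : Forest).owned := by
  have hbut : Owns H F.ownedButScm := (h.perm (Forest.owned_scm F)).sublist (List.sublist_append_right _ _)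
  have hnew := hbut.adopt_aux hok hg hl1 hl2 hn1 hn2 hne
  have hperm := Forest.owned_scm ({ F with scm := some ⟨obj, colors, c⟩ } : Forest)
  exact hnew.perm hperm.symm

/-- **What is owned after `GifMakeMapObject` for the image colour map**: the forest with the new map. -/
theorem Owns.adopt_icm {H H' : Heap} {F : Forest} {mem : Mem} (h : Owns H F.owned) (hok : HeapOK H mem) (hg : H.Grew H')
    {obj colors c : Nat} (hl1 : H'.Live obj 24) (hl2 : H'.Live colors (3 * c)) (hn1 : H.next ≤ obj) (hn2 : H.next ≤ colors)
    (hne : colors ≠ obj) : Owns H' ({ F with icm := some ⟨obj, colors, c⟩ } : Forest).owned := by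
  have hbut : Owns H F.ownedButIcm := (h.perm (Forest.owned_icm F)).sublist (List.sublist_append_right _ _)
  have hnew := hbut.adopt_aux hok hg hl1 hl2 hn1 hn2 hne
  have hperm := Forest.owned_icm ({ F with icm := some ⟨obj, colors, c⟩ } : Forest)
  exact hnew.perm hperm.symm

/-! ### 7. The forest: bookkeeping -/

/-- A function that leaves the forest alone leaves everything but `scm` alone. -/
theorem Forest.SameButScm.refl (F : Forest) : F.SameButScm F := ⟨rfl, rfl, rfl, rfl, rfl⟩

/-- A function that leaves the forest alone leaves everything but `icm` alone. -/
theorem Forest.SameButIcm.refl (F : Forest) : F.SameButIcm F := ⟨rfl, rfl, rfl, rfl, rfl⟩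

/-- A function that leaves the forest alone leaves everything but `saved` alone. -/
theorem Forest.SameButSaved.refl (F : Forest) : F.SameButSaved F := ⟨rfl, rfl, rfl, rfl, rfl⟩

/-- A function that leaves the forest alone leaves everything but `icm` and `saved` alone. -/
theorem Forest.SameButIcmSaved.refl (F : Forest) : F.SameButIcmSaved F := ⟨rfl, rfl, rfl, rfl⟩

/-- A function that leaves the forest alone leaves everything but `pend` alone. -/
theorem Forest.SameButPend.refl (F : Forest) : F.SameButPend F := ⟨rfl, rfl, rfl, rfl, rfl⟩

/-- Changing `icm` only is changing `icm` and `saved` only (DGifGetImageHeader's post inside DGifGetImageDesc's). -/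
theorem Forest.SameButIcm.toIcmSaved {F F' : Forest} (h : F.SameButIcm F') : F.SameButIcmSaved F' :=
  ⟨h.1, h.2.1, h.2.2.1, h.2.2.2.2⟩

/-- Changing `saved` only is changing `icm` and `saved` only. -/
theorem Forest.SameButSaved.toIcmSaved {F F' : Forest} (h : F.SameButSaved F') : F.SameButIcmSaved F' :=
  ⟨h.1, h.2.1, h.2.2.1, h.2.2.2.2⟩

/-- The counted images of a forest with an array. -/
theorem Forest.imgs_some {F : Forest} {s : Saved} (h : F.saved = some s) : F.imgs = s.imgs := by
  unfold Forest.imgs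
  rw [h]

/-- The counted images of a forest without array. -/
theorem Forest.imgs_none {F : Forest} (h : F.saved = none) : F.imgs = [] := by
  unfold Forest.imgs
  rw [h]

/-- The counted images depend on `saved` only. -/
theorem Forest.imgs_congr {F F' : Forest} (h : F'.saved = F.saved) : F'.imgs = F.imgs := by
  unfold Forest.imgs
  rw [h]

/-- A change of `scm` keeps the counted images. -/
theorem Forest.SameButScm.imgs {F F' : Forest} (h : F.SameButScm F') : F'.imgs = F.imgs :=
  Forest.imgs_congr h.2.2.2.1

/-- A change of `icm` keeps the counted images. -/
theorem Forest.SameButIcm.imgs {F F' : Forest} (h : F.SameButIcm F') : F'.imgs = F.imgs :=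
  Forest.imgs_congr h.2.2.2.1

/-- A change of `pend` keeps the counted images. -/
theorem Forest.SameButPend.imgs {F F' : Forest} (h : F.SameButPend F') : F'.imgs = F.imgs :=
  Forest.imgs_congr h.2.2.2.2

/-- Eta for `scm`: storing the component the forest has changes nothing (`m = none`: the NULL arm of a free). -/
theorem Forest.set_scm_eq {F : Forest} {m : Option Map} (h : F.scm = m) : ({ F with scm := m } : Forest) = F := by
  subst h
  rfl

/-- Eta for `icm`. -/
theorem Forest.set_icm_eq {F : Forest} {m : Option Map} (h : F.icm = m) : ({ F with icm := m } : Forest) = F := by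
  subst h
  rfl

/-- Eta for `saved`. -/
theorem Forest.set_saved_eq {F : Forest} {s : Option Saved} (h : F.saved = s) : ({ F with saved := s } : Forest) = F := by
  subst h
  rfl

/-- Eta for `pend`. -/
theorem Forest.set_pend_eq {F : Forest} {e : Option Exts} (h : F.pend = e) : ({ F with pend := e } : Forest) = F := by
  subst h
  rfl

/-- **`Complete` speaks of the counted images only.** -/
theorem Forest.complete_iff (F : Forest) : F.Complete ↔ ∀ g, g ∈ F.imgs → g.raster ≠ none := by
  unfold Forest.Complete Forest.imgs
  constructor
  · intro h g hg
    cases hs : F.saved with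
    | none =>
      rw [hs] at hg
      exact absurd hg List.not_mem_nil
    | some s =>
      rw [hs] at hg
      exact h s hs g hg
  · intro h s hs g hg
    apply h g
    rw [hs]
    exact hg

/-- **The same counted images: still complete** (a function that changes `scm`, `icm`, `pend`, or moves the array). -/
theorem Forest.complete_of_imgs {F F' : Forest} (h : F'.imgs = F.imgs) (hc : F.Complete) : F'.Complete := by
  rw [Forest.complete_iff] at hc ⊢
  rw [h]
  exact hc

/-- **One more counted image, with a raster: still complete** (DGifSlurp after the raster of the new image is allocated). -/
theorem Forest.complete_snoc {F F' : Forest} {g : Img} (h : F'.imgs = F.imgs ++ [g]) (hg : g.raster ≠ none) (hc : F.Complete) :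
    F'.Complete := by
  rw [Forest.complete_iff] at hc ⊢
  rw [h]
  intro x hx
  rcases List.mem_append.mp hx with hold | hnew
  · exact hc x hold
  · rw [List.mem_singleton.mp hnew]
    exact hg

/-- **A forest without counted images is complete.** -/
theorem Forest.complete_of_imgs_nil {F : Forest} (h : F.imgs = []) : F.Complete := by
  rw [Forest.complete_iff, h]
  intro g hg
  exact absurd hg List.not_mem_nil

/-- **A forest without array is complete** (DGifOpen's result). -/
theorem Forest.complete_of_saved_none {F : Forest} (h : F.saved = none) : F.Complete :=
  Forest.complete_of_imgs_nil (Forest.imgs_none h)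

/-! ### 8. The NULL tests of the code -/

/-- **A live object lies at or above 200040H**: a pointer to it is not NULL. -/
theorem live_base_ge {H : Heap} {mem : Mem} {p n : Nat} (hok : HeapOK H mem) (hl : H.Live p n) : 0x200040 ≤ p := by
  obtain ⟨c, hlc⟩ := hl
  have := hok.obj_inside hlc
  simp only at this
  omega

/-- **The pointer field of a colour map that is there is not NULL**, when the map object is live. -/
theorem MapAt.ptr_ne_zero {H : Heap} {mem mem₀ : Mem} {m : Map} {p : Nat} (h : MapAt (some m) p mem) (hok : HeapOK H mem₀)
    (hl : H.Live m.obj 24) : p ≠ 0 := by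
  obtain ⟨e, _⟩ := h
  have := live_base_ge hok hl
  omega

/-- **The pointer field of an extension list that is there is not NULL**, when the array is live (with whatever size). -/
theorem ExtsAt.ptr_ne_zero {H : Heap} {mem mem₀ : Mem} {e : Exts} {p c n : Nat} (h : ExtsAt (some e) p c mem)
    (hok : HeapOK H mem₀) (hl : H.Live e.arr n) : p ≠ 0 := by
  obtain ⟨e1, _⟩ := h
  have := live_base_ge hok hl
  omega

/-- **The pointer field of a SavedImages array that is there is not NULL**, when the array is live (with whatever size). -/
theorem SavedAt.ptr_ne_zero {H : Heap} {mem mem₀ : Mem} {s : Saved} {p c n : Nat} (h : SavedAt (some s) p c mem)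
    (hok : HeapOK H mem₀) (hl : H.Live s.arr n) : p ≠ 0 := by
  obtain ⟨e1, _⟩ := h
  have := live_base_ge hok hl
  omega

/-- **`gif->SColorMap == NULL` exactly when the forest has no screen colour map**: what decides the NULL tests of
DGifGetScreenDesc, DGifCloseFile, GifFreeMapObject's caller. -/
theorem GifOK.scm_null_iff {H : Heap} {F : Forest} {R : Rd} {mem mem₀ : Mem} (h : GifOK H F R mem) (hok : HeapOK H mem₀) :
    GifFileType.SColorMap mem F.gif = 0 ↔ F.scm = none := by
  have hshape := h.shape.scm
  cases hm : F.scm with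
  | none =>
    rw [hm] at hshape
    exact ⟨fun _ => rfl, fun _ => hshape⟩
  | some m =>
    rw [hm] at hshape
    have hl := h.owns.live (m.obj, 24) (Forest.mem_owned_scm (by rw [hm]; exact List.mem_cons_self))
    have hne := hshape.ptr_ne_zero hok hl
    constructor
    · intro e
      exact absurd e hne
    · intro e
      exact absurd e (Option.some_ne_none _)

/-- **`gif->Image.ColorMap == NULL` exactly when the forest has no image colour map** (DGifGetImageHeader l.379, DGifGetImageDesc
l.464, DGifCloseFile). -/
theorem GifOK.icm_null_iff {H : Heap} {F : Forest} {R : Rd} {mem mem₀ : Mem} (h : GifOK H F R mem) (hok : HeapOK H mem₀) :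
    GifFileType.Image.ColorMap mem F.gif = 0 ↔ F.icm = none := by
  have hshape := h.shape.icm
  cases hm : F.icm with
  | none =>
    rw [hm] at hshape
    exact ⟨fun _ => rfl, fun _ => hshape⟩
  | some m =>
    rw [hm] at hshape
    have hl := h.owns.live (m.obj, 24) (Forest.mem_owned_icm (by rw [hm]; exact List.mem_cons_self))
    have hne := hshape.ptr_ne_zero hok hl
    constructor
    · intro e
      exact absurd e hne
    · intro e
      exact absurd e (Option.some_ne_none _)

/-- **`gif->SavedImages == NULL` exactly when the forest has no array** (DGifGetImageDesc l.440, GifFreeSavedImages). -/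
theorem GifOK.saved_null_iff {H : Heap} {F : Forest} {R : Rd} {mem mem₀ : Mem} (h : GifOK H F R mem) (hok : HeapOK H mem₀) :
    GifFileType.SavedImages mem F.gif = 0 ↔ F.saved = none := by
  have hshape := h.shape.saved
  cases hm : F.saved with
  | none =>
    rw [hm] at hshape
    exact ⟨fun _ => rfl, fun _ => hshape.1⟩
  | some s =>
    rw [hm] at hshape
    have hl := h.owns.live (s.arr, 56 * s.cap) (Forest.mem_owned_saved (by rw [hm]; exact List.mem_cons_self))
    have hne := hshape.ptr_ne_zero hok hl
    constructor
    · intro e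
      exact absurd e hne
    · intro e
      exact absurd e (Option.some_ne_none _)

/-- **`gif->ExtensionBlocks == NULL` exactly when the forest has no pending list** (GifAddExtensionBlock l.236, DGifSlurp l.1266,
GifFreeExtensions). -/
theorem GifOK.pend_null_iff {H : Heap} {F : Forest} {R : Rd} {mem mem₀ : Mem} (h : GifOK H F R mem) (hok : HeapOK H mem₀) :
    GifFileType.ExtensionBlocks mem F.gif = 0 ↔ F.pend = none := by
  have hshape := h.shape.pend
  cases hm : F.pend with
  | none =>
    rw [hm] at hshape
    exact ⟨fun _ => rfl, fun _ => hshape.1⟩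
  | some x =>
    rw [hm] at hshape
    have hl := h.owns.live (x.arr, 24 * x.cap) (Forest.mem_owned_pend (by rw [hm]; exact List.mem_cons_self))
    have hne := hshape.ptr_ne_zero hok hl
    constructor
    · intro e
      exact absurd e hne
    · intro e
      exact absurd e (Option.some_ne_none _)

/-! ### 9. Reads -/

/-- **`n` zero bytes read as the number 0** (what `memset(p, 0, n)`'s and `calloc`'s posts deliver, byte by byte; the general form
of `DGifOpen.rd_zero_of_bytes`). -/
theorem rd_zero_of_bytes (mem : Mem) (a n : Nat) (h : ∀ i, i < n → rd mem (a + i) 1 = 0) : rd mem a n = 0 := by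
  unfold rd
  unfold rd at h
  induction n generalizing a with
  | zero => rfl
  | succ n ih =>
    simp only [Mem.readLE]
    have h0 := h 0 (Nat.succ_pos n)
    rw [Nat.add_zero, Mem.readLE_one] at h0
    have hrest : ∀ i, i < n → mem.readLE (UInt64.ofNat (a + 1 + i)) 1 = 0 := by
      intro i hi
      have := h (i + 1) (Nat.succ_lt_succ hi)
      rw [Nat.add_assoc, Nat.add_comm 1 i]
      exact this
    have e : UInt64.ofNat a + 1 = UInt64.ofNat (a + 1) := by
      rw [UInt64.ofNat_add]
      rfl
    rw [e, ih (a + 1) hrest, h0]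

/-! ### 10. A reader's step as a whole -/

/-- **The common post `Back` of a step that moved the cursor**: the footprint `ws` consists of windows that are loose AND heap
windows (the function's own stack: `Loose.stack` + `HeapWin.offHeap`; the caller's buffer: `BufOK.loose` + `BufOK.win`) and of
windows inside the cursor's `cur` field; the shadow is untouched; the new cursor lies in the input and did not go back.
(The general form of what `mem_read` proves about itself: farm.gif/worked/mem_read `mr_back`.) -/
theorem Back.of_set_cursor {H : Heap} {rest : List Obj} {frames : List (Nat × FrameLayout)} {F : Forest} {R : Rd} {u v : State}
    {ws : List Span} (henv : Env H rest frames F R u) (hun : ShadowUntouched u.mem v.mem)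
    (hs : Mem.SameExcept ws u.mem v.mem)
    (hw : ∀ w, w ∈ ws → (Loose H F R w ∧ HeapWin H w) ∨ (R.cur ≤ w.lo ∧ w.hi ≤ R.cur + 8))
    (hc : CursorOK R v.mem) (hrem : Gif.Spec.rem R v.mem ≤ Gif.Spec.rem R u.mem) : Back H rest frames F R u v := by
  have hp := henv.heap
  have hcur := henv.ctx.cursor_range hp.inv.shadow
  have hbase := hp.base
  refine ⟨?_, ⟨henv.ok.owns, ?_⟩, hrem⟩
  · -- the heap's invariant: every window is off the heap's region or inside one object
    refine hp.inv.sameExcept hun hs ?_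
    intro w hin
    rcases hw w hin with ⟨_, hwin⟩ | ⟨h1, h2⟩
    · exact hwin
    · left
      left
      omega
  · -- the shape: every window is loose or inside the cursor's `cur`
    refine henv.ok.shape.set_cursor (henv.ok.owns.placed hp.inv.heap) hp.inv.heap ⟨hcur.1, hcur.2.1⟩ hs ?_ hc
    intro w hin
    rcases hw w hin with ⟨hl, _⟩ | hcw
    · left
      exact hl
    · right
      exact hcw

/-! ### 11. The reader is made -/

/-- **THE READER IS MADE** (gif_decode, gif_driver.c:199-200): `CursorOK` from the two fields of the cursor as they were just stored,
`cur = inB` and `end = inB + inN` (`hc`, `hd`: `rw [← rd_eq_readLE …, w_mem]; u_read`). -/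
theorem CursorOK.make {R : Rd} {mem : Mem} (hc : rd mem R.cur 8 = R.inB) (hd : rd mem (R.cur + 8) 8 = R.inB + R.inN) :
    CursorOK R mem := by
  have c1 : mem_cursor.cur mem R.cur = R.inB := by
    simp only [gfield]
    exact hc
  have c2 : mem_cursor.end mem R.cur = R.inB + R.inN := by
    simp only [gfield]
    exact hd
  refine ⟨?_, ?_, ?_⟩
  · rw [c1]
    exact Nat.le_refl _
  · rw [c1, c2]
    exact Nat.le_add_right _ _
  · exact c2

end Gif.Spec
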